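-- pv_equiv track=rewrite | github.com/hang07020/exabeam-rule-event-regex-reorder | rule_reorder.py | group_fields
-- ===== SOURCE A (Python) =====
-- def group_fields(rule):
--     """Extract groups of fields from a rule."""
--     groups = []
--     current_group = []
--     brace_count = 0  # Track opening and closing braces
--
--     # Split rule into lines and skip the first and last lines
--     lines = rule.split("\n")[1:-1]
--
--     for line in lines:
--         stripped_line = line.strip()
--
--         # Update brace count
--         brace_count += stripped_line.count("{") + stripped_line.count("[")
--         brace_count -= stripped_line.count("}") + stripped_line.count("]")
--
--         current_group.append(line.rstrip())
--
--         # If brace count is balanced and we have content, we close the current group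
--         if brace_count == 0 and current_group:
--             groups.append("\n".join(current_group).strip())
--             current_group = []
--
--     return groups
-- ===== SOURCE B (Python) =====
-- from itertools import accumulate
--
-- def group_fields(rule):
--     """Extract groups of fields from a rule."""
--     lines = rule.split("\n")[1:-1]
--     deltas = [s.count("{") + s.count("[") - s.count("}") - s.count("]")
--               for s in (l.strip() for l in lines)]
--     cums = list(accumulate(deltas))
--     groups = []
--     start = 0
--     for i, c in enumerate(cums):
--         if c == 0:
--             groups.append("\n".join(l.rstrip() for l in lines[start:i + 1]).strip())
--             start = i + 1
--     return groups
-- ===== Notes on version B (the rewrite author's own statement) =====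
-- stated objective: alternative
-- what changed: A interleaves counting and flushing in one loop carrying a mutable current_group and brace_count; B precomputes per-line balance deltas, builds the cumulative-balance table with itertools.accumulate, and slices the line list at the indices where the cumulative balance is zero.
import Mathlib
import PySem

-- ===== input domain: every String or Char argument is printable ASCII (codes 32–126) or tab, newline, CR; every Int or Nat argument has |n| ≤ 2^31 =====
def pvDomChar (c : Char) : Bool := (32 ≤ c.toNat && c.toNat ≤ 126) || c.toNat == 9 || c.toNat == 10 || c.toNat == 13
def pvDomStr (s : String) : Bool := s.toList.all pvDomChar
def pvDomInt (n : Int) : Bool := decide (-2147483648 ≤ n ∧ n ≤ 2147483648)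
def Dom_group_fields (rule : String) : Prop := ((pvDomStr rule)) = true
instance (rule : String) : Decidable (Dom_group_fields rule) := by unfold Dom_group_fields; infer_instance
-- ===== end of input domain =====

-- B replaces A's incremental brace-count/flush loop by a precomputed prefix-balance table
-- whose zero positions delimit slices of the line list (objective: alternative decomposition).

-- ===== PORT A =====
-- A's single loop carrying (groups, current_group, brace_count).
-- rule.split("\n") has a non-empty separator, so split? is always `some`; .getD [] is exact.
def aLoop : List String → List String → List String → Int → List String
  | [], groups, _, _ => groups
  | l :: rest, groups, cur, bc =>
    let s := PySem.Str.strip l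
    let bc2 := bc + ((PySem.Str.count s "{" : Int) + (PySem.Str.count s "[" : Int))
                  - ((PySem.Str.count s "}" : Int) + (PySem.Str.count s "]" : Int))
    let cur' := cur ++ [PySem.Str.rstrip l]
    if bc2 = 0 ∧ cur' ≠ [] then
      aLoop rest (groups ++ [PySem.Str.strip (PySem.Str.join "\n" cur')]) [] bc2
    else
      aLoop rest groups cur' bc2

def group_fields (rule : String) : List String :=
  aLoop (PySem.List.slice ((PySem.Str.split? rule "\n").getD []) (some 1) (some (-1))) [] [] 0

-- ===== PORT B =====
-- per-line balance delta of the stripped line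
def bDelta (l : String) : Int :=
  let s := PySem.Str.strip l
  (PySem.Str.count s "{" : Int) + (PySem.Str.count s "[" : Int)
    - (PySem.Str.count s "}" : Int) - (PySem.Str.count s "]" : Int)

-- itertools.accumulate
def bAccum : Int → List Int → List Int
  | _, [] => []
  | acc, d :: ds => (acc + d) :: bAccum (acc + d) ds

-- loop over the enumerated cumulative table, slicing lines at the zero boundaries
def bLoop (lines : List String) : List (Int × Int) → List String → Int → List String
  | [], groups, _ => groups
  | (i, c) :: rest, groups, start =>
    if c = 0 then
      bLoop lines rest
        (groups ++ [PySem.Str.strip (PySem.Str.join "\n"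
          ((PySem.List.slice lines (some start) (some (i + 1))).map PySem.Str.rstrip))])
        (i + 1)
    else
      bLoop lines rest groups start

def group_fields_alt (rule : String) : List String :=
  let lines := PySem.List.slice ((PySem.Str.split? rule "\n").getD []) (some 1) (some (-1))
  let cums := bAccum 0 (lines.map bDelta)
  bLoop lines (PySem.List.enumerate cums 0) [] 0

-- ===== PRECONDITION & SPEC =====
def Spec_group_fields (rule : String) (out : List String) : Prop := out = group_fields_alt rule
instance (rule : String) (out : List String) : Decidable (Spec_group_fields rule out) := by unfold Spec_group_fields; infer_instance

-- ===== CLAIM (what is proved, stated in full; the proofs are below) =====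
def Claim_equal_group_fields : Prop := ∀ (rule : String), Dom_group_fields rule → Spec_group_fields rule (group_fields rule)

-- ===== LEMMAS AND PROOFS =====
theorem take_succ_of_drop {α : Type} (xs : List α) (m : Nat) (y : α) (ys : List α)
    (h : xs.drop m = y :: ys) : xs.take (m + 1) = xs.take m ++ [y] := by
  have hm : m < xs.length := by
    by_contra hm
    have : xs.drop m = [] := List.drop_eq_nil_of_le (by omega)
    rw [this] at h; exact List.cons_ne_nil _ _ h.symm
  have hx : xs = xs.take m ++ (y :: ys) := by rw [← h]; simp
  conv_lhs => rw [hx]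
  conv_rhs => rw [hx]
  rw [List.take_append]
  simp [List.length_take, Nat.min_eq_left (le_of_lt hm)]

theorem main_invariant (rest : List String) :
    ∀ (lines : List String) (k start : Nat) (c : Int) (groups : List String),
    start ≤ k → lines.drop k = rest →
    aLoop rest groups (((lines.drop start).take (k - start)).map PySem.Str.rstrip) c
      = bLoop lines (PySem.List.enumerate (bAccum c (rest.map bDelta)) k) groups start := by
  induction rest with
  | nil => intro lines k start c groups _ _; simp [aLoop, bAccum, bLoop]
  | cons l rest' ih =>
    intro lines k start c groups hsk hdrop
    have hd1 : lines.drop (k + 1) = rest' := by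
      have h1 : lines.drop (k + 1) = (lines.drop k).drop 1 := by
        rw [List.drop_drop]
      rw [h1, hdrop]; rfl
    have hds : (lines.drop start).drop (k - start) = l :: rest' := by
      rw [List.drop_drop, (by omega : start + (k - start) = k), hdrop]
    have htake : (lines.drop start).take (k - start + 1)
        = (lines.drop start).take (k - start) ++ [l] := take_succ_of_drop _ _ _ _ hds
    have hrw : c + ((PySem.Str.count (PySem.Str.strip l) "{" : Int)
                     + (PySem.Str.count (PySem.Str.strip l) "[" : Int))
                 - ((PySem.Str.count (PySem.Str.strip l) "}" : Int)
                     + (PySem.Str.count (PySem.Str.strip l) "]" : Int)) = c + bDelta l := by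
      simp only [bDelta]; ring
    simp only [aLoop, List.map_cons, bAccum, PySem.List.enumerate_cons, bLoop, hrw]
    by_cases hc : c + bDelta l = 0
    · rw [if_pos ⟨hc, by simp⟩, if_pos hc]
      have := ih lines (k + 1) (k + 1) (c + bDelta l) (groups ++
        [PySem.Str.strip (PySem.Str.join "\n"
          ((((lines.drop start).take (k - start)).map PySem.Str.rstrip) ++ [PySem.Str.rstrip l]))])
        (le_refl _) hd1
      simp only [Nat.sub_self, List.take_zero, List.map_nil] at this
      rw [this]
      have hslice : PySem.List.slice lines (some (start : Int)) (some ((k : Int) + 1))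
          = (lines.drop start).take (k + 1 - start) := by
        have := PySem.List.slice_natCast lines start (k + 1)
        push_cast at this ⊢
        rw [this]
      rw [hslice, (by omega : k + 1 - start = k - start + 1), htake]
      push_cast
      simp [List.map_append]
    · rw [if_neg (by simp [hc]), if_neg hc]
      have := ih lines (k + 1) start (c + bDelta l) groups (by omega) hd1
      rw [(by omega : k + 1 - start = k - start + 1), htake] at this
      simp only [List.map_append, List.map_cons, List.map_nil] at this
      rw [this]
      push_cast
      rfl

-- ===== VERDICT (by name: the statement is the Claim_ definition above) =====
theorem group_fields_spec : Claim_equal_group_fields := by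
  intro rule _
  unfold Spec_group_fields group_fields group_fields_alt
  have := main_invariant
    (PySem.List.slice ((PySem.Str.split? rule "\n").getD []) (some 1) (some (-1)))
    (PySem.List.slice ((PySem.Str.split? rule "\n").getD []) (some 1) (some (-1)))
    0 0 0 [] (le_refl 0) (by simp)
  simpa using this
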